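-- pv_equiv track=rewrite | github.com/aqiu384/megaten-database | src/rrch/tool-parse.py | drop_unused_names
-- ===== SOURCE A (Python) =====
-- def drop_unused_names(all_names, used_names):
--     seen = {}
--     lookup = {}
--     for id, name in all_names.items():
--         if id not in used_names:
--             continue
--
--         if name not in seen:
--             seen[name] = 0
--         new_name = f"{name} {chr(65 + seen[name])}" if seen[name] > 0 else name
--         seen[name] += 1
--
--         lookup[id] = new_name
--     return lookup
-- ===== SOURCE B (Python) =====
-- def drop_unused_names(all_names, used_names):
--     used = set(used_names)
--     kept = [(i, n) for i, n in all_names.items() if i in used]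
--     groups = {}
--     for i, n in kept:
--         groups.setdefault(n, []).append(i)
--     out = {}
--     for i, n in kept:
--         k = groups[n].index(i)
--         out[i] = n if k == 0 else f"{n} {chr(65 + k)}"
--     return out
-- ===== Notes on version B (the rewrite author's own statement) =====
-- stated objective: alternative
-- what changed: Replaces A's single pass with a running per-name counter dict by a filter-then-group decomposition: materialize the surviving (id, name) pairs, group ids by name in a dict of lists, then assign each id its suffix from its index within its name's group.
import Mathlib
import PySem

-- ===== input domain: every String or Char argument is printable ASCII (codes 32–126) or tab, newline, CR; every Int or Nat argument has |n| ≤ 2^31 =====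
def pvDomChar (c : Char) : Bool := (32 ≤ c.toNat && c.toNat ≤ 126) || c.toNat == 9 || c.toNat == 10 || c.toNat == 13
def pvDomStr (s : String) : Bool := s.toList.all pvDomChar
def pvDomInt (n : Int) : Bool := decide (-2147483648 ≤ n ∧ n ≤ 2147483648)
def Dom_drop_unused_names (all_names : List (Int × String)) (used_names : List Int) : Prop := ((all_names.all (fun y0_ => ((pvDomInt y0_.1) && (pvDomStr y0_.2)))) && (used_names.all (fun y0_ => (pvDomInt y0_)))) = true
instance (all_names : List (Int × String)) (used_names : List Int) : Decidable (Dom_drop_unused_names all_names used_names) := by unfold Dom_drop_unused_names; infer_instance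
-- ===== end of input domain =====

-- B replaces A's single running-counter pass by a filter-then-group decomposition (same
-- output; no speed claim).


-- ===== PORT A =====
-- chr(65 + k) is ported by hand as Char.ofNat (exact for the small non-negative codes
-- reached here); the trailing .items returns the result dict as its association list.
def drop_unused_names (all_names : List (Int × String)) (used_names : List Int) : List (Int × String) :=
  (all_names.foldl
    (fun (st : PySem.Dict String Int × PySem.Dict Int String) p =>
      if used_names.contains p.1 = false then st
      else
        let seen := if st.1.contains p.2 = false then st.1.insert p.2 0 else st.1
        let c := seen.getD p.2 0
        let new_name := if c > 0 then p.2 ++ " " ++ String.mk [Char.ofNat (65 + c.toNat)] else p.2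
        (seen.insert p.2 (c + 1), st.2.insert p.1 new_name))
    (PySem.Dict.empty, PySem.Dict.empty)).2.items

-- ===== PORT B =====
-- list.index is ported via PySem.List.index?; each id is a member of its own group, so the
-- none (ValueError) branch is never taken.
def drop_unused_names_alt (all_names : List (Int × String)) (used_names : List Int) : List (Int × String) :=
  let used := PySem.Set.ofList used_names
  let kept := all_names.filter (fun p => used.contains p.1)
  let groups := kept.foldl
    (fun (g : PySem.Dict String (List Int)) p => g.modify p.2 [] (· ++ [p.1])) PySem.Dict.empty
  (kept.foldl
    (fun (out : PySem.Dict Int String) p =>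
      match PySem.List.index? (groups.getD p.2 []) p.1 with
      | some k => out.insert p.1 (if k = 0 then p.2 else p.2 ++ " " ++ String.mk [Char.ofNat (65 + k)])
      | none => out)
    PySem.Dict.empty).items

-- ===== PRECONDITION & SPEC =====
-- all_names is a Python dict, so its keys are necessarily distinct; association lists with
-- duplicate keys correspond to no Python input, and Pre_ admits exactly the dict-shaped lists.
def Pre_drop_unused_names (all_names : List (Int × String)) (used_names : List Int) : Prop :=
  (all_names.map Prod.fst).Nodup
instance (all_names : List (Int × String)) (used_names : List Int) : Decidable (Pre_drop_unused_names all_names used_names) := by unfold Pre_drop_unused_names; infer_instance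
def pvWitness_drop_unused_names : (List (Int × String)) × List Int :=
  ([(1, "a"), (2, "a"), (3, "b")], [1, 2, 3])
def Spec_drop_unused_names (all_names : List (Int × String)) (used_names : List Int) (out : List (Int × String)) : Prop := out = drop_unused_names_alt all_names used_names
instance (all_names : List (Int × String)) (used_names : List Int) (out : List (Int × String)) : Decidable (Spec_drop_unused_names all_names used_names out) := by unfold Spec_drop_unused_names; infer_instance

-- ===== CLAIM (what is proved, stated in full; the proofs are below) =====
def Claim_equal_drop_unused_names : Prop := ∀ (all_names : List (Int × String)) (used_names : List Int), Dom_drop_unused_names all_names used_names → Pre_drop_unused_names all_names used_names → Spec_drop_unused_names all_names used_names (drop_unused_names all_names used_names)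

-- ===== LEMMAS AND PROOFS =====

-- the suffixed name given to the k-th (0-based) surviving occurrence of a name
def pvMkName (n : String) (k : Nat) : String :=
  if 0 < k then n ++ " " ++ String.mk [Char.ofNat (65 + k)] else n

-- the common specification: assign suffixes left to right, `pre` = names already seen
def pvAssign : List (Int × String) → List String → List (Int × String)
  | [], _ => []
  | p :: rest, pre => (p.1, pvMkName p.2 (pre.count p.2)) :: pvAssign rest (pre ++ [p.2])

theorem pv_A_fold (used_names : List Int) (l : List (Int × String)) :
    ∀ (seen : PySem.Dict String Int) (lookup : PySem.Dict Int String) (pre : List String),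
    (∀ n, seen.getD n 0 = ((pre.count n : Nat) : Int)) →
    (∀ p ∈ l, used_names.contains p.1 = true → lookup.contains p.1 = false) →
    ((l.filter (fun p => used_names.contains p.1)).map Prod.fst).Nodup →
    lookup.keys.Nodup →
    (l.foldl
      (fun (st : PySem.Dict String Int × PySem.Dict Int String) p =>
        if used_names.contains p.1 = false then st
        else
          let seen := if st.1.contains p.2 = false then st.1.insert p.2 0 else st.1
          let c := seen.getD p.2 0
          let new_name := if c > 0 then p.2 ++ " " ++ String.mk [Char.ofNat (65 + c.toNat)] else p.2
          (seen.insert p.2 (c + 1), st.2.insert p.1 new_name))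
      (seen, lookup)).2.items
      = lookup.items ++ pvAssign (l.filter (fun p => used_names.contains p.1)) pre := by
  induction l with
  | nil => intro seen lookup pre _ _ _ _; simp [pvAssign]
  | cons p rest ih =>
    intro seen lookup pre hseen hfresh hnodup hlk
    by_cases hu : used_names.contains p.1 = false
    · have hf : List.filter (fun q : Int × String => used_names.contains q.1) (p :: rest)
          = List.filter (fun q : Int × String => used_names.contains q.1) rest := by
        have hmem : p.1 ∉ used_names := by simpa using hu
        simp [List.filter_cons, hmem]
      simp only [List.foldl_cons]
      rw [if_pos hu, hf]
      rw [hf] at hnodup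
      exact ih seen lookup pre hseen (fun q hq => hfresh q (List.mem_cons_of_mem _ hq)) hnodup hlk
    · have hu' : used_names.contains p.1 = true := by simpa using hu
      have hcontF : lookup.contains p.1 = false := hfresh p (List.mem_cons_self) hu'
      -- the setdefault step does not change getD _ 0
      set seen1 := if seen.contains p.2 = false then seen.insert p.2 0 else seen with hseen1
      have hget1 : ∀ n, seen1.getD n 0 = ((pre.count n : Nat) : Int) := by
        intro n
        rw [hseen1]
        split_ifs with hc
        · rw [PySem.Dict.getD_insert]
          split_ifs with hn
          · rw [hn, ← hseen p.2]
            exact (PySem.Dict.getD_of_not_contains _ _ hc).symm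
          · exact hseen n
        · exact hseen n
      have hc0 : seen1.getD p.2 0 = ((pre.count p.2 : Nat) : Int) := hget1 p.2
      have hf : List.filter (fun q : Int × String => used_names.contains q.1) (p :: rest)
          = p :: List.filter (fun q : Int × String => used_names.contains q.1) rest := by
        have hmem : p.1 ∈ used_names := by simpa using hu'
        simp [List.filter_cons, hmem]
      simp only [List.foldl_cons]
      rw [if_neg hu, hf]
      rw [hf] at hnodup
      simp only [List.map_cons, List.nodup_cons] at hnodup
      rw [pvAssign]
      have hstep := ih (seen1.insert p.2 (seen1.getD p.2 0 + 1))
        (lookup.insert p.1 (if seen1.getD p.2 0 > 0 then p.2 ++ " " ++ String.mk [Char.ofNat (65 + (seen1.getD p.2 0).toNat)] else p.2))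
        (pre ++ [p.2]) ?_ ?_ hnodup.2 (PySem.Dict.nodup_keys_insert _ _ _ hlk)
      · rw [hstep, PySem.Dict.items_insert_of_not_contains _ _ hcontF]
        have hname : (if seen1.getD p.2 0 > 0 then p.2 ++ " " ++ String.mk [Char.ofNat (65 + (seen1.getD p.2 0).toNat)] else p.2)
            = pvMkName p.2 (pre.count p.2) := by
          rw [hc0, pvMkName]
          by_cases hk : 0 < pre.count p.2
          · rw [if_pos (by exact_mod_cast hk), if_pos hk, Int.toNat_natCast]
          · rw [if_neg (by exact_mod_cast hk), if_neg hk]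
        rw [hname, List.append_assoc, List.singleton_append]
      · intro n
        rw [PySem.Dict.getD_insert]
        split_ifs with hn
        · subst hn; rw [hc0]; push_cast; simp [List.count_append]
        · rw [hget1 n]
          have : List.count n [p.2] = 0 := by
            simp [List.count_singleton]
            exact fun h => (hn h.symm).elim
          simp [List.count_append, this]
      · intro q hq hqu
        rw [PySem.Dict.contains_insert]
        have hne : q.1 ≠ p.1 := by
          intro he
          apply hnodup.1
          rw [← he]
          exact List.mem_map_of_mem (List.mem_filter.2 ⟨hq, by simpa using hqu⟩)
        simp [hne, hfresh q (List.mem_cons_of_mem _ hq) hqu]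

theorem pv_B_map (full : List (Int × String)) :
    ∀ (suf pre : List (Int × String)), full = pre ++ suf →
    (full.map Prod.fst).Nodup →
    suf.map (fun p => (p.1,
        match PySem.List.index? ((full.filter (fun q => q.2 == p.2)).map Prod.fst) p.1 with
        | some k => (if k = 0 then p.2 else p.2 ++ " " ++ String.mk [Char.ofNat (65 + k)])
        | none => p.2))
      = pvAssign suf (pre.map Prod.snd) := by
  intro suf
  induction suf with
  | nil => intro pre _ _; simp [pvAssign]
  | cons p rest ih =>
    intro pre hfull hnodup
    have hfilter : full.filter (fun q => q.2 == p.2)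
        = pre.filter (fun q => q.2 == p.2) ++ p :: rest.filter (fun q => q.2 == p.2) := by
      rw [hfull, List.filter_append, List.filter_cons_of_pos (by simp)]
    have hnotmem : p.1 ∉ (pre.filter (fun q => q.2 == p.2)).map Prod.fst := by
      intro hmem
      have h1 : p.1 ∈ pre.map Prod.fst := by
        rcases List.mem_map.1 hmem with ⟨q, hq, hq1⟩
        exact hq1 ▸ List.mem_map_of_mem (List.mem_filter.1 hq).1
      have : ¬ (pre.map Prod.fst ++ p.1 :: rest.map Prod.fst).Nodup := by
        intro hnd
        exact (List.disjoint_of_nodup_append hnd) h1 (List.mem_cons_self)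
      exact this (by simpa [hfull] using hnodup)
    have hidx : PySem.List.index? ((full.filter (fun q => q.2 == p.2)).map Prod.fst) p.1
        = some ((pre.map Prod.snd).count p.2) := by
      rw [PySem.List.index?_eq_some_iff]
      refine ⟨(pre.filter (fun q => q.2 == p.2)).map Prod.fst, (rest.filter (fun q => q.2 == p.2)).map Prod.fst, ?_, ?_, hnotmem⟩
      · rw [hfilter]; simp
      · rw [List.length_map, List.count_eq_countP, List.countP_map, ← List.countP_eq_length_filter]
        rfl
    rw [List.map_cons, hidx, pvAssign]
    have hval : (if (pre.map Prod.snd).count p.2 = 0 then p.2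
          else p.2 ++ " " ++ String.mk [Char.ofNat (65 + (pre.map Prod.snd).count p.2)])
        = pvMkName p.2 ((pre.map Prod.snd).count p.2) := by
      rw [pvMkName]
      rcases Nat.eq_zero_or_pos ((pre.map Prod.snd).count p.2) with h | h
      · rw [if_pos h, if_neg (by omega)]
      · rw [if_neg (by omega), if_pos h]
    have hrest := ih (pre ++ [p]) (by simpa using hfull) hnodup
    simp only [List.map_append, List.map_cons, List.map_nil] at hrest
    rw [hrest]
    exact congrArg (· :: _) (congrArg (Prod.mk p.1) hval)

-- ===== VERDICT (by name: the statement is the Claim_ definition above) =====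
theorem pv_nodup_kept (all_names : List (Int × String)) (pred : Int × String → Bool)
    (h : (all_names.map Prod.fst).Nodup) :
    ((all_names.filter pred).map Prod.fst).Nodup :=
  (List.filter_sublist.map Prod.fst).nodup h

theorem drop_unused_names_spec : Claim_equal_drop_unused_names := by
  intro all_names used_names _ hpre
  unfold Spec_drop_unused_names drop_unused_names drop_unused_names_alt
  -- the two filters agree
  have hcont : ∀ x : Int, (PySem.Set.ofList used_names).contains x = used_names.contains x := by
    intro x; rw [Bool.eq_iff_iff]; simp [PySem.Set.mem_ofList]
  have hfil : all_names.filter (fun p => (PySem.Set.ofList used_names).contains p.1)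
      = all_names.filter (fun p => used_names.contains p.1) := by
    apply List.filter_congr; intro q _; simp
  simp only [hfil]
  set kept := all_names.filter (fun p => used_names.contains p.1) with hkept
  have hnk : (kept.map Prod.fst).Nodup := pv_nodup_kept _ _ hpre
  -- A's fold computes pvAssign kept []
  have hA := pv_A_fold used_names all_names PySem.Dict.empty PySem.Dict.empty []
    (fun n => by simp [PySem.Dict.getD_empty])
    (fun q _ _ => PySem.Dict.contains_empty _)
    (hkept ▸ hnk) PySem.Dict.nodup_keys_empty
  rw [hA]
  -- B's groups dict
  have hg : ∀ n, (kept.foldl (fun (g : PySem.Dict String (List Int)) p => g.modify p.2 [] (· ++ [p.1])) PySem.Dict.empty).getD n []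
      = (kept.filter (fun q => q.2 == n)).map Prod.fst := by
    intro n
    have h := PySem.Dict.getD_foldl_modify_append (kept.map (fun p => (p.2, p.1))) PySem.Dict.empty n
    rw [List.foldl_map] at h
    simpa [PySem.Dict.getD_empty, List.filter_map, List.map_map, Function.comp] using h
  -- B's output fold is an insert fold over fresh keys
  have hsome : ∀ p ∈ kept, ∃ k, PySem.List.index?
      (((kept.foldl (fun (g : PySem.Dict String (List Int)) p => g.modify p.2 [] (· ++ [p.1])) PySem.Dict.empty)).getD p.2 []) p.1 = some k := by
    intro p hp
    rw [hg p.2]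
    have hmem : p.1 ∈ (kept.filter (fun q => q.2 == p.2)).map Prod.fst :=
      List.mem_map_of_mem (List.mem_filter.2 ⟨hp, by simp⟩)
    rcases (PySem.List.index?_isSome_iff _ _).2 hmem with h
    exact Option.isSome_iff_exists.1 h
  rw [PySem.List.foldl_congr_mem kept _
      (fun (out : PySem.Dict Int String) p => out.insert p.1
        (match PySem.List.index? (((kept.foldl (fun (g : PySem.Dict String (List Int)) p => g.modify p.2 [] (· ++ [p.1])) PySem.Dict.empty)).getD p.2 []) p.1 with
          | some k => (if k = 0 then p.2 else p.2 ++ " " ++ String.mk [Char.ofNat (65 + k)])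
          | none => p.2)) _
      (by
        intro acc x hx
        rcases hsome x hx with ⟨k, hk⟩
        simp only [hk])]
  rw [PySem.Dict.items_foldl_insert_fresh kept Prod.fst _ PySem.Dict.empty
      (fun a _ => PySem.Dict.contains_empty _) hnk]
  have hmapeq : kept.map (fun p => (p.1,
      match PySem.List.index? (((kept.foldl (fun (g : PySem.Dict String (List Int)) p => g.modify p.2 [] (· ++ [p.1])) PySem.Dict.empty)).getD p.2 []) p.1 with
        | some k => (if k = 0 then p.2 else p.2 ++ " " ++ String.mk [Char.ofNat (65 + k)])
        | none => p.2))
      = kept.map (fun p => (p.1,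
      match PySem.List.index? ((kept.filter (fun q => q.2 == p.2)).map Prod.fst) p.1 with
        | some k => (if k = 0 then p.2 else p.2 ++ " " ++ String.mk [Char.ofNat (65 + k)])
        | none => p.2)) := by
    apply List.map_congr_left
    intro p _
    rw [hg p.2]
  rw [hmapeq, pv_B_map kept kept [] (by simp) hnk]
  rfl
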